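-- pv_equiv track=rewrite | github.com/ykro/consensus | solvers/proyecto.py | _get_participant_preferences
-- ===== SOURCE A (Python) =====
-- SKILL_TO_TASK = {
--     "frontend": ["interfaz de usuario"],
--     "backend": ["desarrollo de API", "integracion de servicios"],
--     "base de datos": ["base de datos"],
--     "devops": ["deployment"],
--     "testing": ["testing automatizado"],
--     "documentacion": ["documentacion tecnica"],
--     "diseno UI/UX": ["interfaz de usuario"],
--     "seguridad": ["seguridad"],
--     "gestion de proyecto": ["code review"],
-- }
--
-- def _get_participant_preferences(participant: dict, all_tasks: list[str]) -> list[str]: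
--     """Genera lista ordenada de preferencias de tareas para un participante."""
--     tareas_evitar = set(participant.get("tareas_evitar", []))
--     tareas_interes = participant.get("tareas_interes", [])
--     habilidades = set(participant.get("habilidades", []))
--
--     # Calcular score para cada tarea
--     task_scores = {}
--     for task in all_tasks:
--         if task in tareas_evitar:
--             continue  # Skip tareas a evitar
--
--         score = 0
--         # Bonus por interes
--         if task in tareas_interes:
--             score += 10 + (len(tareas_interes) - tareas_interes.index(task))
--
--         # Bonus por habilidad relevante
--         for skill, tasks in SKILL_TO_TASK.items():
--             if task in tasks and skill in habilidades:
--                 score += 5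
--                 break
--
--         task_scores[task] = score
--
--     # Ordenar por score descendente
--     return sorted(task_scores.keys(), key=lambda t: task_scores[t], reverse=True)
-- ===== SOURCE B (Python) =====
-- SKILL_TO_TASK = {
--     "frontend": ["interfaz de usuario"],
--     "backend": ["desarrollo de API", "integracion de servicios"],
--     "base de datos": ["base de datos"],
--     "devops": ["deployment"],
--     "testing": ["testing automatizado"],
--     "documentacion": ["documentacion tecnica"],
--     "diseno UI/UX": ["interfaz de usuario"],
--     "seguridad": ["seguridad"],
--     "gestion de proyecto": ["code review"],
-- }
--
-- # Reverse index: task -> set of skills that grant it (built once).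
-- TASK_TO_SKILLS = {}
-- for _skill, _tasks in SKILL_TO_TASK.items():
--     for _t in _tasks:
--         TASK_TO_SKILLS[_t] = TASK_TO_SKILLS.get(_t, set()) | {_skill}
--
--
-- def _get_participant_preferences(participant: dict, all_tasks: list[str]) -> list[str]:
--     avoid = set(participant.get("tareas_evitar", []))
--     interes = participant.get("tareas_interes", [])
--     skills = set(participant.get("habilidades", []))
--
--     def score(task):
--         s = 10 + len(interes) - interes.index(task) if task in interes else 0
--         if TASK_TO_SKILLS.get(task, set()) & skills:
--             s += 5
--         return s
--
--     candidates = list(dict.fromkeys(t for t in all_tasks if t not in avoid))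
--     return sorted(candidates, key=score, reverse=True)
-- ===== Notes on version B (the rewrite author's own statement) =====
-- stated objective: idiomatic
-- what changed: A's inner per-task scan over SKILL_TO_TASK with break is replaced by a reverse index TASK_TO_SKILLS built once plus a set-intersection test, and the score dict is dropped: B sorts the deduplicated non-avoided task list directly by a score function.
import Mathlib
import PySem

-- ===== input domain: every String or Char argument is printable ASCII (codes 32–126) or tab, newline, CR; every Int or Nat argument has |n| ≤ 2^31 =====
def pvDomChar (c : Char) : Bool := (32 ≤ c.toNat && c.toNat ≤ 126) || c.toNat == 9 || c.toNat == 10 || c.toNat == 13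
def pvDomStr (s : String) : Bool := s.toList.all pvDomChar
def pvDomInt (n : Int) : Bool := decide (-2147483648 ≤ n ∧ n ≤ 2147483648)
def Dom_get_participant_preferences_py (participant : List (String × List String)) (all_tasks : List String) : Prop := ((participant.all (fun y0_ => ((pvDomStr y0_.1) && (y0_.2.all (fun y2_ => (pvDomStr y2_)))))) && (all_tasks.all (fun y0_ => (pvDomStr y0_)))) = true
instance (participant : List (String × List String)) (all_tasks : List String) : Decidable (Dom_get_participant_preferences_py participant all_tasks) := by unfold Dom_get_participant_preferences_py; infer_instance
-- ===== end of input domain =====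

-- B replaces A's inner scan over SKILL_TO_TASK (with break) by a precomputed reverse index
-- task -> set of skills and a set intersection, and sorts the deduplicated candidate list
-- directly by a score function instead of building a score dict first (objective: idiomatic).

-- ===== PORT A =====
def SKILL_TO_TASK_items : List (String × List String) :=
  [("frontend", ["interfaz de usuario"]),
   ("backend", ["desarrollo de API", "integracion de servicios"]),
   ("base de datos", ["base de datos"]),
   ("devops", ["deployment"]),
   ("testing", ["testing automatizado"]),
   ("documentacion", ["documentacion tecnica"]),
   ("diseno UI/UX", ["interfaz de usuario"]),
   ("seguridad", ["seguridad"]),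
   ("gestion de proyecto", ["code review"])]

-- the inner 'for skill, tasks in SKILL_TO_TASK.items(): … break' loop of A
def aSkillLoop (items : List (String × List String)) (task : String) (habilidades : PySem.Set String) (score : Int) : Int :=
  match items with
  | [] => score
  | (skill, tasks) :: rest =>
      if tasks.contains task && PySem.Set.contains habilidades skill then score + 5
      else aSkillLoop rest task habilidades score

-- the body of A's 'for task in all_tasks' loop computing 'score' for one task
def aScore (tareas_interes : List String) (habilidades : PySem.Set String) (task : String) : Int :=
  let score : Int := 0
  let score := if tareas_interes.contains task then
      score + (10 + ((tareas_interes.length : Int) - (((PySem.List.index? tareas_interes task).getD 0 : Nat) : Int)))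
    else score
  aSkillLoop SKILL_TO_TASK_items task habilidades score

def get_participant_preferences_py (participant : List (String × List String)) (all_tasks : List String) : List String :=
  let p := PySem.Dict.mk participant
  let tareas_evitar : PySem.Set String := PySem.Set.ofList (p.getD "tareas_evitar" [])
  let tareas_interes : List String := p.getD "tareas_interes" []
  let habilidades : PySem.Set String := PySem.Set.ofList (p.getD "habilidades" [])
  let task_scores : PySem.Dict String Int :=
    all_tasks.foldl (fun ts task =>
      if PySem.Set.contains tareas_evitar task then ts
      else ts.insert task (aScore tareas_interes habilidades task)) PySem.Dict.empty
  -- Python's task_scores[t] cannot raise here (t ranges over the keys): getD is exact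
  PySem.List.sorted task_scores.keys (fun t => task_scores.getD t 0) true

-- ===== PORT B =====
-- module-level reverse index: TASK_TO_SKILLS[t] = TASK_TO_SKILLS.get(t, set()) | {skill}
def TASK_TO_SKILLS : PySem.Dict String (PySem.Set String) :=
  SKILL_TO_TASK_items.foldl (fun d p =>
    p.2.foldl (fun d t =>
      d.insert t (PySem.Set.union (d.getD t PySem.Set.empty) (PySem.Set.ofList [p.1]))) d)
    PySem.Dict.empty

def bScore (interes : List String) (skills : PySem.Set String) (task : String) : Int :=
  let s : Int := if interes.contains task then
      10 + (interes.length : Int) - (((PySem.List.index? interes task).getD 0 : Nat) : Int)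
    else 0
  if PySem.Set.inter (TASK_TO_SKILLS.getD task PySem.Set.empty) skills ≠ [] then s + 5 else s

def get_participant_preferences_py_alt (participant : List (String × List String)) (all_tasks : List String) : List String :=
  let p := PySem.Dict.mk participant
  let avoid : PySem.Set String := PySem.Set.ofList (p.getD "tareas_evitar" [])
  let interes : List String := p.getD "tareas_interes" []
  let skills : PySem.Set String := PySem.Set.ofList (p.getD "habilidades" [])
  let candidates := PySem.List.dedup (all_tasks.filter (fun t => !(PySem.Set.contains avoid t)))
  PySem.List.sorted candidates (fun t => bScore interes skills t) true

-- ===== PRECONDITION & SPEC =====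
def Spec_get_participant_preferences_py (participant : List (String × List String)) (all_tasks : List String) (out : List String) : Prop := out = get_participant_preferences_py_alt participant all_tasks
instance (participant : List (String × List String)) (all_tasks : List String) (out : List String) : Decidable (Spec_get_participant_preferences_py participant all_tasks out) := by unfold Spec_get_participant_preferences_py; infer_instance

-- ===== CLAIM (what is proved, stated in full; the proofs are below) =====
def Claim_equal_get_participant_preferences_py : Prop := ∀ (participant : List (String × List String)) (all_tasks : List String), Dom_get_participant_preferences_py participant all_tasks → Spec_get_participant_preferences_py participant all_tasks (get_participant_preferences_py participant all_tasks)

-- ===== LEMMAS AND PROOFS =====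

-- A's loop that skips avoided tasks equals a loop over the filtered list
theorem foldl_if_skip {α β : Type} (l : List α) (p : α → Bool) (g : β → α → β) (init : β) :
    l.foldl (fun d x => if p x then d else g d x) init
      = (l.filter (fun x => !p x)).foldl g init := by
  induction l generalizing init with
  | nil => rfl
  | cons x l ih =>
    by_cases h : p x = true <;> simp [h, ih]

-- a dict built by inserting (x, f x) for x in l: lookup
theorem get?_foldl_insert_fun (l : List String) (f : String → Int) (d : PySem.Dict String Int) (t : String) :
    (l.foldl (fun d x => d.insert x (f x)) d).get? t
      = if t ∈ l then some (f t) else d.get? t := by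
  induction l generalizing d with
  | nil => simp
  | cons x l ih =>
    simp only [List.foldl_cons, ih, List.mem_cons]
    by_cases hl : t ∈ l
    · simp [hl]
    · by_cases hx : t = x <;> simp [hl, hx, PySem.Dict.get?_insert]

theorem insertBy_congr {α : Type} (b1 b2 : α → α → Bool) (x : α) (ys : List α)
    (h : ∀ y ∈ ys, b1 x y = b2 x y) :
    PySem.List.insertBy b1 x ys = PySem.List.insertBy b2 x ys := by
  induction ys with
  | nil => rfl
  | cons y ys ih =>
    simp only [PySem.List.insertBy]
    rw [h y (by simp)]
    split_ifs with hb
    · rfl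
    · rw [ih (fun z hz => h z (by simp [hz]))]

theorem foldl_insertBy_congr {α : Type} (b1 b2 : α → α → Bool) (l : List α)
    (hb : ∀ a ∈ l, ∀ c ∈ l, b1 a c = b2 a c) :
    ∀ (xs acc : List α), (∀ x ∈ xs, x ∈ l) → (∀ x ∈ acc, x ∈ l) →
    xs.foldl (fun acc x => PySem.List.insertBy b1 x acc) acc
      = xs.foldl (fun acc x => PySem.List.insertBy b2 x acc) acc := by
  intro xs
  induction xs with
  | nil => intro acc _ _; rfl
  | cons x xs ih =>
    intro acc hxs hacc
    simp only [List.foldl_cons]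
    rw [insertBy_congr b1 b2 x acc (fun y hy => hb x (hxs x (by simp)) y (hacc y hy))]
    exact ih _ (fun z hz => hxs z (by simp [hz]))
      (fun z hz => by
        rcases (PySem.List.mem_insertBy _ _ _ _).1 hz with h | h
        · exact h ▸ hxs x (by simp)
        · exact hacc z h)

-- sorted is congruent in the key on the elements of the list
theorem sorted_key_congr (l : List String) (k1 k2 : String → Int)
    (h : ∀ x ∈ l, k1 x = k2 x) :
    PySem.List.sorted l k1 true = PySem.List.sorted l k2 true := by
  rw [PySem.List.sorted_rev_eq_foldl_insertBy, PySem.List.sorted_rev_eq_foldl_insertBy]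
  exact foldl_insertBy_congr _ _ l
    (fun a ha c hc => by rw [h a ha, h c hc]) l [] (fun x hx => hx) (fun x hx => by cases hx)

-- the concrete reverse index as a literal dict
theorem tts_eq : TASK_TO_SKILLS = PySem.Dict.mk
    [("interfaz de usuario", ["frontend", "diseno UI/UX"]),
     ("desarrollo de API", ["backend"]),
     ("integracion de servicios", ["backend"]),
     ("base de datos", ["base de datos"]),
     ("deployment", ["devops"]),
     ("testing automatizado", ["testing"]),
     ("documentacion tecnica", ["documentacion"]),
     ("seguridad", ["seguridad"]),
     ("code review", ["gestion de proyecto"])] := by decide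

-- the skill bonus: A's break-loop = B's set-intersection test
theorem score_eq (interes : List String) (hab : PySem.Set String) (task : String) :
    aScore interes hab task = bScore interes hab task := by
  have hint : aScore interes hab task =
      aSkillLoop SKILL_TO_TASK_items task hab
        (if interes.contains task then
          10 + (interes.length : Int) - (((PySem.List.index? interes task).getD 0 : Nat) : Int)
        else 0) := by
    simp only [aScore]
    split_ifs with h
    · congr 1; ring
    · rfl
  rw [hint]
  unfold bScore
  rw [tts_eq]
  by_cases h0 : task = "interfaz de usuario"
  · subst h0; simp [aSkillLoop, SKILL_TO_TASK_items, PySem.Set.inter, PySem.Set.contains,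
      PySem.Dict.getD, PySem.Dict.get?_mk_cons, List.filter]
    split_ifs <;> simp_all
  by_cases h1 : task = "desarrollo de API"
  · subst h1; simp [aSkillLoop, SKILL_TO_TASK_items, PySem.Set.inter, PySem.Set.contains,
      PySem.Dict.getD, PySem.Dict.get?_mk_cons, List.filter]
    split_ifs <;> simp_all
  by_cases h2 : task = "integracion de servicios"
  · subst h2; simp [aSkillLoop, SKILL_TO_TASK_items, PySem.Set.inter, PySem.Set.contains,
      PySem.Dict.getD, PySem.Dict.get?_mk_cons, List.filter]
    split_ifs <;> simp_all
  by_cases h3 : task = "base de datos"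
  · subst h3; simp [aSkillLoop, SKILL_TO_TASK_items, PySem.Set.inter, PySem.Set.contains,
      PySem.Dict.getD, PySem.Dict.get?_mk_cons, List.filter]
    split_ifs <;> simp_all
  by_cases h4 : task = "deployment"
  · subst h4; simp [aSkillLoop, SKILL_TO_TASK_items, PySem.Set.inter, PySem.Set.contains,
      PySem.Dict.getD, PySem.Dict.get?_mk_cons, List.filter]
    split_ifs <;> simp_all
  by_cases h5 : task = "testing automatizado"
  · subst h5; simp [aSkillLoop, SKILL_TO_TASK_items, PySem.Set.inter, PySem.Set.contains,
      PySem.Dict.getD, PySem.Dict.get?_mk_cons, List.filter]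
    split_ifs <;> simp_all
  by_cases h6 : task = "documentacion tecnica"
  · subst h6; simp [aSkillLoop, SKILL_TO_TASK_items, PySem.Set.inter, PySem.Set.contains,
      PySem.Dict.getD, PySem.Dict.get?_mk_cons, List.filter]
    split_ifs <;> simp_all
  by_cases h7 : task = "seguridad"
  · subst h7; simp [aSkillLoop, SKILL_TO_TASK_items, PySem.Set.inter, PySem.Set.contains,
      PySem.Dict.getD, PySem.Dict.get?_mk_cons, List.filter]
    split_ifs <;> simp_all
  by_cases h8 : task = "code review"
  · subst h8; simp [aSkillLoop, SKILL_TO_TASK_items, PySem.Set.inter, PySem.Set.contains,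
      PySem.Dict.getD, PySem.Dict.get?_mk_cons, List.filter]
    split_ifs <;> simp_all
  · simp [aSkillLoop, SKILL_TO_TASK_items, PySem.Set.inter, PySem.Set.contains,
      PySem.Dict.getD, PySem.Dict.get?_mk_cons, h0, h1, h2, h3, h4, h5, h6, h7, h8,
      Ne.symm h0, Ne.symm h1, Ne.symm h2, Ne.symm h3, Ne.symm h4, Ne.symm h5, Ne.symm h6,
      Ne.symm h7, Ne.symm h8]
    intro a ha
    simp [PySem.Dict.get?] at ha

-- ===== VERDICT (by name: the statement is the Claim_ definition above) =====
theorem keys_update_nil (l : List String) :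
    PySem.Set.update (PySem.Dict.empty (κ := String) (ν := Int)).keys l = PySem.List.dedup l := by
  simp [PySem.Set.update, PySem.List.dedup_eq_ofList, PySem.Set.ofList_eq_foldl, PySem.Dict.keys_empty]

theorem get_participant_preferences_py_spec : Claim_equal_get_participant_preferences_py := by
  intro participant all_tasks _
  unfold Spec_get_participant_preferences_py
  simp only [get_participant_preferences_py, get_participant_preferences_py_alt]
  rw [foldl_if_skip]
  set p := PySem.Dict.mk participant with hp
  set interes := p.getD "tareas_interes" [] with hi
  set hab := PySem.Set.ofList (p.getD "habilidades" []) with hh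
  set l := all_tasks.filter
      (fun t => !(PySem.Set.contains (PySem.Set.ofList (p.getD "tareas_evitar" [])) t)) with hl
  set d := l.foldl (fun ts task => ts.insert task (aScore interes hab task)) PySem.Dict.empty with hd
  have hkeys : d.keys = PySem.List.dedup l := by
    rw [hd, PySem.Dict.keys_foldl_insert, keys_update_nil]
  rw [hkeys]
  apply sorted_key_congr
  intro t ht
  have htl : t ∈ l := by simpa [PySem.List.mem_dedup] using ht
  rw [PySem.Dict.getD_eq_get?_getD, hd, get?_foldl_insert_fun]
  simp [htl, score_eq]
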